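-- pv_equiv track=rewrite | github.com/gxnda/project-euler-attempts | euler_51.py | get_all_wildcard_permutations
-- ===== SOURCE A (Python) =====
-- def get_all_wildcard_permutations(to_be_wildcarded: str):
--     length = len(to_be_wildcarded)
--     perms = []
--     for i in range(2 ** length):
--         binary_i = str(bin(i)[2:].zfill(length))
--
--         star_overlay = binary_i.replace("1", "*")
--         temp_wildcard_str = to_be_wildcarded
--         for j in range(length):
--             if star_overlay[j] == "*":
--                 temp_wildcard_str = temp_wildcard_str[:j] + "*" + temp_wildcard_str[j + 1:]
--         perms.append(temp_wildcard_str)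
--
--     return perms
-- ===== SOURCE B (Python) =====
-- from itertools import product
--
--
-- def get_all_wildcard_permutations(to_be_wildcarded: str):
--     return [''.join(t) for t in product(*((c, '*') for c in to_be_wildcarded))]
-- ===== Notes on version B (the rewrite author's own statement) =====
-- stated objective: idiomatic
-- what changed: Replaced the count-to-2^n-and-format-a-binary-mask-then-rebuild-the-string-by-repeated-slicing approach with a single itertools.product over the per-position choices (original char, '*'), joined directly.
import Mathlib
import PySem

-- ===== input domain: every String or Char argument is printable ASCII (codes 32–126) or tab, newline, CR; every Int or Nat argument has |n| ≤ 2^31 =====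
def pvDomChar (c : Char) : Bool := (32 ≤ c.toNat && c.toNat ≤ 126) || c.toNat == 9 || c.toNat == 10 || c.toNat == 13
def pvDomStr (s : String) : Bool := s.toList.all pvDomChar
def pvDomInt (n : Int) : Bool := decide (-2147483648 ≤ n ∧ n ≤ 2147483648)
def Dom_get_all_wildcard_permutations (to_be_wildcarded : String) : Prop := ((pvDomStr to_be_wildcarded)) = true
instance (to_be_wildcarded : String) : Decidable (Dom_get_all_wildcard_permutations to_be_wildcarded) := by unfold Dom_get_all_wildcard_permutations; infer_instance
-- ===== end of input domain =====

-- B replaces A's count-to-2^n / binary-string-mask / slice-rebuild enumeration by one Cartesian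
-- product over the per-position choices (char, '*'), joined directly (more idiomatic).


-- ===== PORT A =====
-- Literal transliteration of A on the character list (PySem.Chars/List primitives; `str(...)` of a
-- str is the identity and is dropped; `2 ** length` is the nonnegative integer 2 ^ length).
def get_all_wildcard_permutations (to_be_wildcarded : String) : List String :=
  let cs := to_be_wildcarded.toList
  let length := cs.length
  let perms := (PySem.List.pyRange 0 ((2 ^ length : Nat) : Int) 1).foldl (fun perms i =>
    let binary_i := PySem.Chars.zfill (PySem.List.slice (PySem.Int.toBinChars0b i) (some 2) none) (length : Int)
    let star_overlay := PySem.Chars.replace binary_i ['1'] ['*']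
    let temp_wildcard_str := (PySem.List.pyRange 0 (length : Int) 1).foldl (fun temp j =>
      if PySem.List.pyGet? star_overlay j = some '*' then
        PySem.List.slice temp none (some j) ++ ['*'] ++ PySem.List.slice temp (some (j + 1)) none
      else temp) cs
    perms ++ [String.ofList temp_wildcard_str]) []
  perms

-- ===== PORT B =====
-- itertools.product(*pools): the leftmost pool varies slowest.
def pvProduct : List (List Char) → List (List Char)
  | [] => [[]]
  | pool :: rest => pool.flatMap (fun x => (pvProduct rest).map (x :: ·))

def get_all_wildcard_permutations_alt (to_be_wildcarded : String) : List String :=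
  (pvProduct (to_be_wildcarded.toList.map (fun c => [c, '*']))).map String.ofList

-- ===== PRECONDITION & SPEC =====
def Spec_get_all_wildcard_permutations (to_be_wildcarded : String) (out : List String) : Prop := out = get_all_wildcard_permutations_alt to_be_wildcarded
instance (to_be_wildcarded : String) (out : List String) : Decidable (Spec_get_all_wildcard_permutations to_be_wildcarded out) := by unfold Spec_get_all_wildcard_permutations; infer_instance

-- ===== CLAIM (what is proved, stated in full; the proofs are below) =====
def Claim_equal_get_all_wildcard_permutations : Prop := ∀ (to_be_wildcarded : String), Dom_get_all_wildcard_permutations to_be_wildcarded → Spec_get_all_wildcard_permutations to_be_wildcarded (get_all_wildcard_permutations to_be_wildcarded)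

-- ===== LEMMAS AND PROOFS =====
def pvBinAux (n : Nat) : List Char :=
  if _h : n < 2 then [Nat.digitChar n]
  else pvBinAux (n / 2) ++ [Nat.digitChar (n % 2)]
  decreasing_by exact Nat.div_lt_self (by omega) (by omega)
def pvBitsBE : Nat → Nat → List Char
  | 0, _ => []
  | n + 1, i => pvBitsBE n (i / 2) ++ [if i % 2 = 1 then '1' else '0']
def pvStar (c : Char) : Char := if c = '1' then '*' else c

lemma pvToDigitsCore_two (fuel : Nat) : ∀ (n : Nat) (ds : List Char), n < fuel →
    Nat.toDigitsCore 2 fuel n ds = pvBinAux n ++ ds := by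
  induction fuel with
  | zero => omega
  | succ fuel ih =>
    intro n ds h
    rw [Nat.toDigitsCore]
    by_cases h2 : n / 2 = 0
    · simp only [h2, if_pos]
      rw [pvBinAux]
      have : n < 2 := by omega
      simp [this, Nat.mod_eq_of_lt this]
    · simp only [h2, ite_false]
      rw [ih _ _ (by omega)]
      conv_rhs => rw [pvBinAux]
      have : ¬ n < 2 := by omega
      simp [this]

lemma pvToDigits_two (n : Nat) : Nat.toDigits 2 n = pvBinAux n := by
  simpa [Nat.toDigits] using pvToDigitsCore_two (n + 1) n [] (by omega)

lemma pvBinAux_head (n : Nat) : ∃ c t, pvBinAux n = c :: t ∧ c ≠ '+' ∧ c ≠ '-' := by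
  induction n using Nat.strong_induction_on with
  | _ n ih =>
    rw [pvBinAux]
    by_cases h : n < 2
    · refine ⟨Nat.digitChar n, [], by simp [h], ?_, ?_⟩ <;> interval_cases n <;> decide
    · obtain ⟨c, t, hct, h1, h2⟩ := ih (n / 2) (Nat.div_lt_self (by omega) (by omega))
      exact ⟨c, t ++ [Nat.digitChar (n % 2)], by simp [h, hct], h1, h2⟩

lemma pvZfill_digits (c : Char) (t : List Char) (w : Int) (h1 : c ≠ '+') (h2 : c ≠ '-') :
    PySem.Chars.zfill (c :: t) w = List.replicate (w.toNat - (c :: t).length) '0' ++ (c :: t) := by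
  rw [PySem.Chars.zfill]
  split_ifs with hif hpm
  · have h0 : w.toNat - (t.length + 1) = 0 := by
      simp only [List.length_cons] at hif; omega
    simp [h0]
  · rcases hpm with h | h <;> simp_all
  · rfl

lemma pvBitsBE_zero (n : Nat) : pvBitsBE n 0 = List.replicate n '0' := by
  induction n with
  | zero => rfl
  | succ n ih => rw [pvBitsBE, ih, List.replicate_succ']; rfl

lemma pvBitsBE_length (n i : Nat) : (pvBitsBE n i).length = n := by
  induction n generalizing i with
  | zero => rfl
  | succ n ih => simp [pvBitsBE, ih]

lemma pvBinAux_length_le (n e : Nat) (he : 1 ≤ e) (h : n < 2 ^ e) : (pvBinAux n).length ≤ e := by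
  induction e generalizing n with
  | zero => omega
  | succ e ih =>
    rw [pvBinAux]
    by_cases h2 : n ≤ 1
    · simp [h2]
    · have he' : 1 ≤ e := by
        rcases Nat.eq_zero_or_pos e with h0 | h0
        · subst h0; omega
        · omega
      have := ih (n / 2) he' (by omega)
      simp [h2]
      omega

lemma pvZfillBin (n : Nat) (hn : 1 ≤ n) : ∀ i : Nat, i < 2 ^ n →
    PySem.Chars.zfill (pvBinAux i) (n : Int) = pvBitsBE n i := by
  induction n, hn using Nat.le_induction with
  | base =>
    intro i hi
    interval_cases i <;> rw [pvBinAux] <;> decide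
  | succ n hn ih =>
    intro i hi
    obtain ⟨c, t, hct, h1, h2⟩ := pvBinAux_head i
    rw [hct, pvZfill_digits c t _ h1 h2, ← hct]
    by_cases hsmall : i < 2
    · have hb : pvBinAux i = [Nat.digitChar i] := by
        rw [pvBinAux]; simp [show i ≤ 1 by omega]
      have hd : Nat.digitChar i = if i % 2 = 1 then '1' else '0' := by
        interval_cases i <;> decide
      rw [hb, hd, pvBitsBE, Nat.div_eq_of_lt hsmall, pvBitsBE_zero]
      have hlen : ((n + 1 : Nat) : Int).toNat - ([if i % 2 = 1 then '1' else '0']).length = n := by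
        simp
      rw [hlen]
    · -- i ≥ 2 : peel the last binary digit
      have hbin : pvBinAux i = pvBinAux (i / 2) ++ [Nat.digitChar (i % 2)] := by
        conv_lhs => rw [pvBinAux]
        simp [show ¬ i ≤ 1 by omega]
      rw [hbin]
      have hq : i / 2 < 2 ^ n := by
        have : 2 ^ (n + 1) = 2 * 2 ^ n := by ring
        omega
      have hIH := ih (i / 2) hq
      obtain ⟨c', t', hct', h1', h2'⟩ := pvBinAux_head (i / 2)
      rw [hct', pvZfill_digits c' t' _ h1' h2'] at hIH
      rw [pvBitsBE, ← hIH, hct']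
      have hlq : (c' :: t').length ≤ n := by
        rw [← hct']; exact pvBinAux_length_le _ _ hn hq
      have hrep : ((n + 1 : Nat) : Int).toNat - ((c' :: t') ++ [Nat.digitChar (i % 2)]).length
          = ((n : Nat) : Int).toNat - (c' :: t').length := by
        simp only [Int.toNat_natCast, List.length_append, List.length_cons, List.length_nil]
        omega
      have hd : Nat.digitChar (i % 2) = if i % 2 = 1 then '1' else '0' := by
        have : i % 2 < 2 := Nat.mod_lt _ (by omega)
        interval_cases h : i % 2 <;> decide
      rw [hrep, hd]
      simp [List.append_assoc]

lemma pvBitsBE_low (n i : Nat) (h : i < 2 ^ n) : pvBitsBE (n + 1) i = '0' :: pvBitsBE n i := by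
  induction n generalizing i with
  | zero =>
    have : i = 0 := by omega
    subst this; rfl
  | succ n ih =>
    have hq : i / 2 < 2 ^ n := by
      have : 2 ^ (n + 1) = 2 * 2 ^ n := by ring
      omega
    rw [pvBitsBE, ih _ hq]
    rfl

lemma pvBitsBE_high (n i : Nat) (h : i < 2 ^ n) :
    pvBitsBE (n + 1) (2 ^ n + i) = '1' :: pvBitsBE n i := by
  induction n generalizing i with
  | zero =>
    have : i = 0 := by omega
    subst this; rfl
  | succ n ih =>
    have hdiv : (2 ^ (n + 1) + i) / 2 = 2 ^ n + i / 2 := by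
      have h2 : 2 ^ (n + 1) = 2 ^ n * 2 := by ring
      rw [h2, Nat.add_comm, Nat.add_mul_div_right _ _ (by omega), Nat.add_comm]
    have hmod : (2 ^ (n + 1) + i) % 2 = i % 2 := by
      have h2 : 2 ^ (n + 1) = 2 ^ n * 2 := by ring
      rw [h2, Nat.add_comm, Nat.add_mul_mod_self_right]
    have hq : i / 2 < 2 ^ n := by
      have : 2 ^ (n + 1) = 2 * 2 ^ n := by ring
      omega
    rw [pvBitsBE, hdiv, hmod, ih _ hq, pvBitsBE]
    rfl

lemma pvReplace_go (fuel : Nat) : ∀ (l acc : List Char), l.length ≤ fuel →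
    PySem.Chars.replace.go ['1'] ['*'] fuel l acc = acc.reverse ++ l.map pvStar := by
  induction fuel with
  | zero =>
    intro l acc h
    have : l = [] := by cases l <;> simp_all
    subst this
    simp [PySem.Chars.replace.go]
  | succ fuel ih =>
    intro l acc h
    cases l with
    | nil => simp [PySem.Chars.replace.go]
    | cons c t =>
      rw [PySem.Chars.replace.go]
      by_cases hc : c = '1'
      · subst hc
        have hpre : List.isPrefixOf ['1'] ('1' :: t) = true := by simp [List.isPrefixOf]
        rw [if_pos hpre]
        simp only [List.length_cons] at h
        rw [ih _ _ (by simpa using Nat.le_of_succ_le_succ h)]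
        simp [pvStar]
      · have hpre : List.isPrefixOf ['1'] (c :: t) = false := by
          simp [List.isPrefixOf]; exact fun hh => absurd hh.symm hc
        rw [if_neg (by simp [hpre])]
        rw [ih _ _ (by simpa using Nat.le_of_succ_le_succ h)]
        simp [pvStar, hc]

lemma pvReplace_star (l : List Char) : PySem.Chars.replace l ['1'] ['*'] = l.map pvStar := by
  rw [PySem.Chars.replace]
  simp only [List.isEmpty_cons]
  simpa using pvReplace_go l.length l [] le_rfl

def pvMask (o c : Char) : Char := if o = '*' then '*' else c

lemma pvInner (o s : List Char) (hlen : o.length = s.length) : ∀ m : Nat, m ≤ s.length →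
    (PySem.List.pyRange 0 (m : Int) 1).foldl (fun temp j =>
      if PySem.List.pyGet? o j = some '*' then
        PySem.List.slice temp none (some j) ++ ['*'] ++ PySem.List.slice temp (some (j + 1)) none
      else temp) s
    = List.zipWith pvMask (o.take m) (s.take m) ++ s.drop m := by
  intro m
  induction m with
  | zero => intro _; simp [PySem.List.pyRange_one_eq_nil]
  | succ m ih =>
    intro hm
    have hm' : m ≤ s.length := by omega
    have hcast : ((m + 1 : Nat) : Int) = (m : Int) + 1 := by push_cast; ring
    rw [hcast, PySem.List.pyRange_one_succ_right (by positivity), List.foldl_append]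
    rw [ih hm']
    have hms : m < s.length := by omega
    have hmo : m < o.length := by omega
    have hZlen : (List.zipWith pvMask (o.take m) (s.take m)).length = m := by
      simp [List.length_zipWith]; omega
    have hdropm : s.drop m = s[m] :: s.drop (m + 1) := List.drop_eq_getElem_cons hms
    have hget : PySem.List.pyGet? o (m : Int) = some o[m] := by
      simp [PySem.List.pyGet?_natCast, List.getElem?_eq_getElem hmo]
    simp only [List.foldl_cons, List.foldl_nil, hget]
    have htake1 : o.take (m + 1) = o.take m ++ [o[m]] := by
      rw [List.take_add_one]; simp [List.getElem?_eq_getElem hmo]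
    have htake2 : s.take (m + 1) = s.take m ++ [s[m]] := by
      rw [List.take_add_one]; simp [List.getElem?_eq_getElem hms]
    have hzip : List.zipWith pvMask (o.take (m + 1)) (s.take (m + 1))
        = List.zipWith pvMask (o.take m) (s.take m) ++ [pvMask o[m] s[m]] := by
      rw [htake1, htake2, List.zipWith_append (by simp; omega)]
      rfl
    by_cases hstar : o[m] = '*'
    · rw [if_pos (by rw [hstar])]
      have hsl1 : PySem.List.slice (List.zipWith pvMask (o.take m) (s.take m) ++ s.drop m) none (some (m : Int))
          = List.zipWith pvMask (o.take m) (s.take m) := by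
        rw [PySem.List.slice_to_natCast, List.take_left' hZlen]
      have hsl2 : PySem.List.slice (List.zipWith pvMask (o.take m) (s.take m) ++ s.drop m) (some ((m : Int) + 1)) none
          = s.drop (m + 1) := by
        have : ((m : Int) + 1) = ((m + 1 : Nat) : Int) := by push_cast; ring
        rw [this, PySem.List.slice_from_natCast]
        rw [hdropm, show List.zipWith pvMask (o.take m) (s.take m) ++ s[m] :: s.drop (m + 1)
            = (List.zipWith pvMask (o.take m) (s.take m) ++ [s[m]]) ++ s.drop (m + 1) by simp]
        exact List.drop_left' (by simp [hZlen])
      rw [hsl1, hsl2, hzip]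
      simp [pvMask, hstar]
    · rw [if_neg (by simp [hstar])]
      rw [hzip, hdropm]
      simp [pvMask, hstar]

lemma pvCentral (cs : List Char) :
    (List.range (2 ^ cs.length)).map
      (fun k => List.zipWith pvMask ((pvBitsBE cs.length k).map pvStar) cs)
    = pvProduct (cs.map (fun c => [c, '*'])) := by
  induction cs with
  | nil => simp [pvProduct]
  | cons c t ih =>
    have hsplit : List.range (2 ^ (c :: t).length) = List.range (2 ^ t.length)
        ++ (List.range (2 ^ t.length)).map (2 ^ t.length + ·) := by
      rw [show (2 : Nat) ^ (c :: t).length = 2 ^ t.length + 2 ^ t.length by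
        simp [List.length_cons]; ring]
      exact List.range_add
    rw [hsplit, List.map_append, List.map_map]
    have hlow : (List.range (2 ^ t.length)).map
        (fun k => List.zipWith pvMask ((pvBitsBE (c :: t).length k).map pvStar) (c :: t))
        = (List.range (2 ^ t.length)).map
          (fun k => c :: List.zipWith pvMask ((pvBitsBE t.length k).map pvStar) t) := by
      apply List.map_congr_left
      intro k hk
      rw [List.mem_range] at hk
      rw [show (c :: t).length = t.length + 1 from rfl, pvBitsBE_low _ _ hk]
      simp [pvStar, pvMask]
    have hhigh : (List.range (2 ^ t.length)).map
        ((fun k => List.zipWith pvMask ((pvBitsBE (c :: t).length k).map pvStar) (c :: t))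
          ∘ (2 ^ t.length + ·))
        = (List.range (2 ^ t.length)).map
          (fun k => '*' :: List.zipWith pvMask ((pvBitsBE t.length k).map pvStar) t) := by
      apply List.map_congr_left
      intro k hk
      rw [List.mem_range] at hk
      simp only [Function.comp_apply]
      rw [show (c :: t).length = t.length + 1 from rfl, pvBitsBE_high _ _ hk]
      simp [pvStar, pvMask]
    rw [hlow, hhigh]
    have hP : pvProduct (List.map (fun c => [c, '*']) (c :: t))
        = (pvProduct (List.map (fun c => [c, '*']) t)).map (c :: ·)
          ++ (pvProduct (List.map (fun c => [c, '*']) t)).map ('*' :: ·) := by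
      simp [pvProduct]
    rw [hP, ← ih]
    simp [List.map_map, Function.comp_def]

lemma pvOverlay (n k : Nat) (hn : 1 ≤ n) (hk : k < 2 ^ n) :
    PySem.Chars.replace
      (PySem.Chars.zfill (PySem.List.slice (PySem.Int.toBinChars0b (k : Int)) (some 2) none) (n : Int))
      ['1'] ['*'] = (pvBitsBE n k).map pvStar := by
  have h0b : PySem.Int.toBinChars0b (k : Int) = '0' :: 'b' :: pvBinAux k := by
    rw [PySem.Int.toBinChars0b, if_neg (by omega), Int.toNat_natCast, pvToDigits_two]
  rw [h0b, show ((2 : Int)) = ((2 : Nat) : Int) by norm_num, PySem.List.slice_from_natCast]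
  simp only [List.drop_succ_cons, List.drop_zero]
  rw [pvZfillBin n hn k hk, pvReplace_star]

lemma pvMain (cs : List Char) :
    (PySem.List.pyRange 0 ((2 ^ cs.length : Nat) : Int) 1).foldl (fun perms i =>
      let binary_i := PySem.Chars.zfill (PySem.List.slice (PySem.Int.toBinChars0b i) (some 2) none) ((cs.length : Nat) : Int)
      let star_overlay := PySem.Chars.replace binary_i ['1'] ['*']
      let temp_wildcard_str := (PySem.List.pyRange 0 ((cs.length : Nat) : Int) 1).foldl (fun temp j =>
        if PySem.List.pyGet? star_overlay j = some '*' then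
          PySem.List.slice temp none (some j) ++ ['*'] ++ PySem.List.slice temp (some (j + 1)) none
        else temp) cs
      perms ++ [String.ofList temp_wildcard_str]) []
    = (pvProduct (cs.map (fun c => [c, '*']))).map String.ofList := by
  cases cs with
  | nil => decide
  | cons c t =>
    set cs := c :: t with hcs
    have hn : 1 ≤ cs.length := by simp [hcs]
    rw [PySem.List.pyRange_zero_nat (2 ^ cs.length), List.foldl_map, PySem.List.foldl_append_singleton_eq_map]
    simp only [List.nil_append]
    rw [← pvCentral, List.map_map]
    apply List.map_congr_left
    intro k hk
    rw [List.mem_range] at hk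
    simp only [Function.comp_apply]
    congr 1
    rw [pvOverlay cs.length k hn hk]
    have hlen : ((pvBitsBE cs.length k).map pvStar).length = cs.length := by
      simp [pvBitsBE_length]
    have := pvInner ((pvBitsBE cs.length k).map pvStar) cs hlen cs.length le_rfl
    rw [this]
    simp [List.take_of_length_le (le_of_eq hlen)]

-- ===== VERDICT (by name: the statement is the Claim_ definition above) =====
theorem get_all_wildcard_permutations_spec : Claim_equal_get_all_wildcard_permutations := by
  intro s _
  unfold Spec_get_all_wildcard_permutations get_all_wildcard_permutations get_all_wildcard_permutations_alt
  exact pvMain s.toList
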